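-- pv_equiv track=rewrite | github.com/alexthefatcat/AllMyCode | Program_Hacks_and_Site_Scrapes/bittorrent_read_dat_file.py | split_by_brackets
-- ===== SOURCE A (Python) =====
-- def split_by_brackets(string,before="{",after="}"):
--     """
--     string0 = "adcrecr{first}sdcsds}dsd{sa{second}"
--     lstring0 = split_by_brackets(string0)
--     data = lstring0[1::2]
--     # data => ['first', 'second']
--     """
--     parts1 = string.split(before)
--     parts2 = [ part.split(after,1) for part in parts1]
--
--     for i,line in  enumerate(parts2):
--         if i == 0:
--            out = [after.join(line)]
--         else:
--            out[-1] = out[-1]+before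
--            if len(line)==1 :
--               out[-1] = out[-1]+line[0]
--            else:
--               out.extend([line[0], after+line[1]])
--     return out
-- ===== SOURCE B (Python) =====
-- def split_by_brackets(string, before="{", after="}"):
--     """Single forward scan over the text after each `before` occurrence, closing an
--     inside token only when `after` occurs before the next `before`."""
--     if before == "" or after == "":
--         raise ValueError("empty separator")
--     nb = string.find(before)
--     if nb == -1:
--         return [string]
--     out = []
--     cur = string[:nb]                      # outside text accumulated so far
--     rest = string[nb + len(before):]       # a `before` was just consumed
--     while True:
--         nb = rest.find(before)
--         seg = rest if nb == -1 else rest[:nb]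
--         j = seg.find(after)
--         if j == -1:
--             cur = cur + before + seg
--         else:
--             out += [cur + before, seg[:j]]
--             cur = after + seg[j + len(after):]
--         if nb == -1:
--             out.append(cur)
--             return out
--         rest = rest[nb + len(before):]
-- ===== Notes on version B (the rewrite author's own statement) =====
-- stated objective: alternative
-- what changed: A splits the whole string by `before`, pre-splits every part at the first `after`, then merges pieces back with index bookkeeping; B never builds those intermediate lists: it does one forward scan, recursing on the text after each `before` and closing an inside token only when `after` occurs before the next `before`.
import Mathlib
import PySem

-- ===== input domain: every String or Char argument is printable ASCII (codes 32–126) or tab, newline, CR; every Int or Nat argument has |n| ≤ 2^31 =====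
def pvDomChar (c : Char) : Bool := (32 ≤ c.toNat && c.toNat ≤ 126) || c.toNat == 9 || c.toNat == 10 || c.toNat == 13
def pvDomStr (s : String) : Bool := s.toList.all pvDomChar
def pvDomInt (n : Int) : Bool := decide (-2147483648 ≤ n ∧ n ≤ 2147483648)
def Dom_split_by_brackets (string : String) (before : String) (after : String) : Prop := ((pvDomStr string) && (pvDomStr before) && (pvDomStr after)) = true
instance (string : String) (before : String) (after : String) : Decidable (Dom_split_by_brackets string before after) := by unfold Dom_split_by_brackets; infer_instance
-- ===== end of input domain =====

-- B replaces A's split-everything-then-merge pass by a single forward scan that recurses on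
-- the text after each `before` occurrence (objective: alternative decomposition, same cost).

-- ===== PORT A =====
-- the body of A's `for i,line in enumerate(parts2)` loop (python indices are ints)
def aStep (b a : List Char) (out : List (List Char)) (il : Int × List (List Char)) : List (List Char) :=
  if il.1 = 0 then
    [PySem.Chars.join a il.2]                                   -- out = [after.join(line)]
  else
    -- out[-1] = out[-1] + before  (out is never empty after the i == 0 iteration)
    let out1 := out.dropLast ++ [out.getLastD [] ++ b]
    if il.2.length = 1 then
      out1.dropLast ++ [out1.getLastD [] ++ il.2.headD []]      -- out[-1] = out[-1] + line[0]
    else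
      out1 ++ [il.2.headD [], a ++ il.2.getD 1 []]              -- out.extend([line[0], after+line[1]])

def split_by_brackets_core (s b a : List Char) : List (List Char) :=
  match PySem.Chars.split? s b with
  | none => []                                                  -- str.split raises ValueError here (outside Pre_)
  | some parts1 =>
      -- parts2 = [part.split(after, 1) for part in parts1]; the none case (empty after) is outside Pre_
      let parts2 := parts1.map (fun part => (PySem.Chars.splitMax? part a 1).getD [])
      (PySem.List.enumerate parts2).foldl (aStep b a) []

def split_by_brackets (string : String) (before : String) (after : String) : List String :=
  (split_by_brackets_core string.toList before.toList after.toList).map String.ofList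

-- ===== PORT B =====
-- Source B's while loop: `out` is the finished tokens, `cur` the outside text accumulated
-- so far, a `before` was just consumed before `rest`. The fuel argument only makes the
-- loop a structural recursion; it starts above `rest.length` and each iteration removes
-- at least one character from `rest` (b ≠ [] inside Pre_).
def bScan (b a : List Char) : Nat → List (List Char) → List Char → List Char → List (List Char)
  | 0, out, cur, _ => out ++ [cur]
  | fuel+1, out, cur, rest =>
    let nb := PySem.Chars.find rest b
    let seg := if nb = -1 then rest else PySem.List.slice rest none (some nb)
    let j := PySem.Chars.find seg a
    let out' := if j = -1 then out
                else out ++ [cur ++ b, PySem.List.slice seg none (some j)]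
    let cur' := if j = -1 then cur ++ b ++ seg
                else a ++ PySem.List.slice seg (some (j + (a.length : Int))) none
    if nb = -1 then out' ++ [cur']
    else bScan b a fuel out' cur' (PySem.List.slice rest (some (nb + (b.length : Int))) none)

def split_by_brackets_alt_core (s b a : List Char) : List (List Char) :=
  if b.isEmpty || a.isEmpty then []                             -- Source B raises ValueError here (outside Pre_)
  else
    let nb := PySem.Chars.find s b
    if nb = -1 then [s]
    else bScan b a s.length [] (PySem.List.slice s none (some nb))
           (PySem.List.slice s (some (nb + (b.length : Int))) none)

def split_by_brackets_alt (string : String) (before : String) (after : String) : List String :=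
  (split_by_brackets_alt_core string.toList before.toList after.toList).map String.ofList

-- ===== PRECONDITION & SPEC =====
-- A raises ValueError when before or after is empty (str.split / str.split(after, 1) refuse an empty separator).
def Pre_split_by_brackets (string : String) (before : String) (after : String) : Prop :=
  before ≠ "" ∧ after ≠ ""
instance (string : String) (before : String) (after : String) : Decidable (Pre_split_by_brackets string before after) := by unfold Pre_split_by_brackets; infer_instance

def pvWitness_split_by_brackets : String × String × String :=
  ("adcrecr{first}sdcsds}dsd{sa{second}", "{", "}")

def Spec_split_by_brackets (string : String) (before : String) (after : String) (out : List String) : Prop := out = split_by_brackets_alt string before after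
instance (string : String) (before : String) (after : String) (out : List String) : Decidable (Spec_split_by_brackets string before after out) := by unfold Spec_split_by_brackets; infer_instance

-- ===== CLAIM (what is proved, stated in full; the proofs are below) =====
def Claim_equal_split_by_brackets : Prop := ∀ (string : String) (before : String) (after : String), Dom_split_by_brackets string before after → Pre_split_by_brackets string before after → Spec_split_by_brackets string before after (split_by_brackets string before after)

-- ===== LEMMAS AND PROOFS =====

theorem modifyHead_fun_id {α : Type} (l : List α) : l.modifyHead (fun x => x) = l := by
  cases l <;> rfl

theorem modifyHead_congr {α : Type} (f g : α → α) (l : List α) (h : ∀ x, f x = g x) :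
    l.modifyHead f = l.modifyHead g := by
  cases l <;> simp [h]

-- clean recursive description of Python str.split(sep) (sep ≠ "")
def sp (sep : List Char) : List Char → List (List Char)
  | [] => [[]]
  | c :: rest =>
    if sep.isPrefixOf (c :: rest) then [] :: sp sep (rest.drop (sep.length - 1))
    else (sp sep rest).modifyHead (c :: ·)
  termination_by l => l.length
  decreasing_by all_goals simp <;> omega

-- clean recursive description of Python str.split(sep, 1) (sep ≠ "")
def sp1 (sep : List Char) : List Char → List (List Char)
  | [] => [[]]
  | c :: rest =>
    if sep.isPrefixOf (c :: rest) then [[], rest.drop (sep.length - 1)]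
    else (sp1 sep rest).modifyHead (c :: ·)

theorem drop_len_cons (sep : List Char) (hs : sep ≠ []) (c : Char) (rest : List Char) :
    List.drop sep.length (c :: rest) = rest.drop (sep.length - 1) := by
  obtain ⟨k, hk⟩ : ∃ k, sep.length = k + 1 :=
    ⟨sep.length - 1, by have := List.length_pos_iff.mpr hs; omega⟩
  rw [hk, List.drop_succ_cons]
  simp

theorem go_eq_sp (sep : List Char) (hs : sep ≠ []) :
    ∀ fuel (l cur : List Char) (acc : List (List Char)), l.length < fuel →
      PySem.Chars.splitOn.go sep fuel l cur acc
        = acc.reverse ++ ((sp sep l).modifyHead (cur.reverse ++ ·)) := by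
  intro fuel
  induction fuel with
  | zero => intro l cur acc h; omega
  | succ f ih =>
    intro l cur acc hl
    cases l with
    | nil =>
      rw [PySem.Chars.splitOn.go.eq_def]
      simp [sp]
    | cons c rest =>
      rw [PySem.Chars.splitOn.go.eq_def]
      by_cases hp : sep.isPrefixOf (c :: rest)
      · have hlen : 0 < sep.length := List.length_pos_iff.mpr hs
        have hdrop := drop_len_cons sep hs c rest
        simp only [hp, if_true]
        rw [ih _ _ _ (by rw [hdrop]; simp at hl ⊢; omega)]
        rw [sp]
        simp only [hp, if_true, hdrop, List.reverse_cons, List.reverse_nil,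
          List.modifyHead_cons, List.nil_append, List.append_assoc]
        rw [modifyHead_fun_id]
        simp
      · simp only [hp, Bool.false_eq_true, if_false]
        rw [ih _ _ _ (by simp at hl ⊢; omega)]
        rw [sp]
        simp only [hp, Bool.false_eq_true, if_false, List.modifyHead_modifyHead]
        congr 1
        apply modifyHead_congr
        intro x
        simp

theorem splitOn_eq_sp (s sep : List Char) (hs : sep ≠ []) :
    PySem.Chars.splitOn s sep = sp sep s := by
  unfold PySem.Chars.splitOn
  rw [go_eq_sp sep hs _ _ _ _ (by omega)]
  simp only [List.reverse_nil, List.nil_append]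
  rw [modifyHead_fun_id]

theorem goM_zero (sep : List Char) :
    ∀ fuel (l cur : List Char) (acc : List (List Char)), 0 < fuel →
      PySem.Chars.splitOnMax.go sep fuel 0 l cur acc = acc.reverse ++ [cur.reverse ++ l] := by
  intro fuel l cur acc h
  cases fuel with
  | zero => omega
  | succ f =>
    rw [PySem.Chars.splitOnMax.go.eq_def]
    cases l <;> simp

theorem goM_one (sep : List Char) (hs : sep ≠ []) :
    ∀ fuel (l cur : List Char) (acc : List (List Char)), l.length < fuel →
      PySem.Chars.splitOnMax.go sep fuel 1 l cur acc
        = acc.reverse ++ ((sp1 sep l).modifyHead (cur.reverse ++ ·)) := by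
  intro fuel
  induction fuel with
  | zero => intro l cur acc h; omega
  | succ f ih =>
    intro l cur acc hl
    cases l with
    | nil =>
      rw [PySem.Chars.splitOnMax.go.eq_def]
      simp [sp1]
    | cons c rest =>
      rw [PySem.Chars.splitOnMax.go.eq_def]
      by_cases hp : sep.isPrefixOf (c :: rest)
      · have hdrop := drop_len_cons sep hs c rest
        have hf : 0 < f := by simp at hl; omega
        simp only [hp, if_true, one_ne_zero, if_false]
        norm_num
        rw [goM_zero sep f _ _ _ hf]
        rw [sp1]
        simp [hp, hdrop]
      · simp only [hp, Bool.false_eq_true, if_false, one_ne_zero]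
        norm_num
        rw [ih _ _ _ (by simp at hl ⊢; omega)]
        rw [sp1]
        simp only [hp, Bool.false_eq_true, if_false, List.modifyHead_modifyHead]
        congr 1
        apply modifyHead_congr
        intro x
        simp

theorem splitOnMax_one (s sep : List Char) (hs : sep ≠ []) :
    PySem.Chars.splitOnMax s sep 1 = sp1 sep s := by
  unfold PySem.Chars.splitOnMax
  norm_num
  rw [goM_one sep hs _ _ _ _ (by omega)]
  simp only [List.reverse_nil, List.nil_append]
  rw [modifyHead_fun_id]

theorem find_go_shift (sub : List Char) :
    ∀ (l : List Char) (k : Nat), PySem.Chars.find.go sub l k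
      = if PySem.Chars.find l sub = -1 then -1 else (k : Int) + PySem.Chars.find l sub := by
  intro l
  induction l with
  | nil =>
    intro k
    show PySem.Chars.find.go sub [] k = _
    rw [PySem.Chars.find.go.eq_def]
    unfold PySem.Chars.find
    rw [PySem.Chars.find.go.eq_def]
    by_cases h : sub.isEmpty <;> simp [h]
  | cons c t ih =>
    intro k
    rw [PySem.Chars.find.go.eq_def]
    unfold PySem.Chars.find
    rw [PySem.Chars.find.go.eq_def]
    by_cases hp : sub.isPrefixOf (c :: t)
    · simp [hp]
    · simp only [hp, Bool.false_eq_true, if_false]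
      rw [ih (k+1), ih 1]
      by_cases h : PySem.Chars.find t sub = -1
      · simp [h]
      · have := PySem.Chars.neg_one_le_find t sub
        simp only [h, if_false]
        have h1 : ¬ ((1:Int) + PySem.Chars.find t sub = -1) := by omega
        push_cast
        rw [if_neg h1]
        ring

theorem find_nil' (sub : List Char) (hs : sub ≠ []) : PySem.Chars.find [] sub = -1 := by
  unfold PySem.Chars.find
  rw [PySem.Chars.find.go.eq_def]
  simp [hs]

theorem find_cons (sub : List Char) (c : Char) (rest : List Char) :
    PySem.Chars.find (c :: rest) sub
      = if sub.isPrefixOf (c :: rest) then 0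
        else if PySem.Chars.find rest sub = -1 then -1 else 1 + PySem.Chars.find rest sub := by
  unfold PySem.Chars.find
  rw [PySem.Chars.find.go.eq_def]
  by_cases hp : sub.isPrefixOf (c :: rest)
  · simp [hp]
  · simp only [hp, Bool.false_eq_true, if_false]
    rw [find_go_shift]
    rw [show PySem.Chars.find.go sub rest 0 = PySem.Chars.find rest sub from rfl]
    norm_num

theorem sp_char (b : List Char) (hb : b ≠ []) :
    ∀ (n : Nat) (s : List Char), s.length ≤ n →
    sp b s = if PySem.Chars.find s b = -1 then [s]
      else s.take (PySem.Chars.find s b).toNat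
            :: sp b (s.drop ((PySem.Chars.find s b).toNat + b.length)) := by
  intro n
  induction n with
  | zero =>
    intro s hs
    have : s = [] := List.eq_nil_of_length_eq_zero (by omega)
    subst this
    simp [sp, find_nil' b hb]
  | succ n ih =>
    intro s hs
    cases s with
    | nil => simp [sp, find_nil' b hb]
    | cons c rest =>
      rw [sp, find_cons]
      by_cases hp : b.isPrefixOf (c :: rest)
      · simp only [hp, if_true]
        norm_num
        rw [drop_len_cons b hb c rest]
      · simp only [hp, Bool.false_eq_true, if_false]
        rw [ih rest (by simp at hs; omega)]
        by_cases hf : PySem.Chars.find rest b = -1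
        · simp [hf]
        · have hge : 0 ≤ PySem.Chars.find rest b := by
            have := PySem.Chars.neg_one_le_find rest b; omega
          have hne : ¬ ((1:Int) + PySem.Chars.find rest b = -1) := by omega
          simp only [hf, if_false, hne]
          have ht : ((1:Int) + PySem.Chars.find rest b).toNat
              = (PySem.Chars.find rest b).toNat + 1 := by omega
          rw [ht, List.take_succ_cons]
          simp only [List.modifyHead_cons]
          rw [show (PySem.Chars.find rest b).toNat + 1 + b.length
                = ((PySem.Chars.find rest b).toNat + b.length) + 1 from by omega]
          rw [List.drop_succ_cons]

theorem sp1_char (a : List Char) (ha : a ≠ []) (p : List Char) :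
    sp1 a p = if PySem.Chars.find p a = -1 then [p]
      else [p.take (PySem.Chars.find p a).toNat,
            p.drop ((PySem.Chars.find p a).toNat + a.length)] := by
  induction p with
  | nil => simp [sp1, find_nil' a ha]
  | cons c rest ih =>
    rw [sp1, find_cons]
    by_cases hp : a.isPrefixOf (c :: rest)
    · simp only [hp, if_true]
      norm_num
      rw [drop_len_cons a ha c rest]
    · simp only [hp, Bool.false_eq_true, if_false]
      rw [ih]
      by_cases hf : PySem.Chars.find rest a = -1
      · simp [hf]
      · have hge : 0 ≤ PySem.Chars.find rest a := by
          have := PySem.Chars.neg_one_le_find rest a; omega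
        have hne : ¬ ((1:Int) + PySem.Chars.find rest a = -1) := by omega
        simp only [hf, if_false, hne]
        have ht : ((1:Int) + PySem.Chars.find rest a).toNat
            = (PySem.Chars.find rest a).toNat + 1 := by omega
        rw [ht, List.take_succ_cons]
        simp only [List.modifyHead_cons]
        rw [show (PySem.Chars.find rest a).toNat + 1 + a.length
              = ((PySem.Chars.find rest a).toNat + a.length) + 1 from by omega]
        rw [List.drop_succ_cons]

theorem sp1_ne_nil (a p : List Char) : sp1 a p ≠ [] := by
  induction p with
  | nil => simp [sp1]
  | cons c rest ih =>
    rw [sp1]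
    by_cases hp : a.isPrefixOf (c :: rest)
    · simp [hp]
    · simp only [hp, Bool.false_eq_true, if_false]
      cases h : sp1 a rest with
      | nil => exact absurd h ih
      | cons x xs => simp

theorem join_cons_of_ne_nil (a : List Char) (c : Char) (L : List (List Char)) (h : L ≠ []) :
    PySem.Chars.join a (L.modifyHead (c :: ·)) = c :: PySem.Chars.join a L := by
  cases L with
  | nil => exact absurd rfl h
  | cons x xs =>
    cases xs with
    | nil => simp [PySem.Chars.join_singleton]
    | cons y ys => simp [PySem.Chars.join_cons_cons]

theorem join_sp1 (a : List Char) (ha : a ≠ []) (p : List Char) :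
    PySem.Chars.join a (sp1 a p) = p := by
  induction p with
  | nil => simp [sp1, PySem.Chars.join_singleton]
  | cons c rest ih =>
    rw [sp1]
    by_cases hp : a.isPrefixOf (c :: rest)
    · simp only [hp, if_true]
      rw [PySem.Chars.join_cons_cons, PySem.Chars.join_singleton]
      obtain ⟨t, ht⟩ : a <+: (c :: rest) := List.isPrefixOf_iff_prefix.mp hp
      rw [← drop_len_cons a ha c rest, ← ht, List.drop_left]
      simpa using ht
    · simp only [hp, Bool.false_eq_true, if_false]
      rw [join_cons_of_ne_nil a c _ (sp1_ne_nil a rest), ih]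

-- the loop body of A for i ≠ 0, acting on the raw part p (line = p.split(after,1))
def aStepNZ (b a : List Char) (out : List (List Char)) (p : List Char) : List (List Char) :=
  if (sp1 a p).length = 1 then
    out.dropLast ++ [out.getLastD [] ++ b ++ (sp1 a p).headD []]
  else
    out.dropLast ++ [out.getLastD [] ++ b, (sp1 a p).headD [], a ++ (sp1 a p).getD 1 []]

theorem enum_fold (b a : List Char) (qs : List (List Char)) :
    ∀ (k : Int) (out : List (List Char)), 1 ≤ k →
      (PySem.List.enumerate (qs.map (sp1 a)) k).foldl (aStep b a) out
        = qs.foldl (aStepNZ b a) out := by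
  induction qs with
  | nil => intro k out hk; rfl
  | cons q qs ih =>
    intro k out hk
    have hstep : aStep b a out (k, sp1 a q) = aStepNZ b a out q := by
      have hk0 : ¬ (k = 0) := by omega
      simp only [aStep, hk0, if_false, aStepNZ, List.dropLast_concat, List.getLastD_concat]
      by_cases h1 : (sp1 a q).length = 1
      · simp [h1]
      · simp [h1, List.append_assoc]
    show (PySem.List.enumerate (sp1 a q :: qs.map (sp1 a)) k).foldl (aStep b a) out = _
    rw [show PySem.List.enumerate (sp1 a q :: qs.map (sp1 a)) k
        = (k, sp1 a q) :: PySem.List.enumerate (qs.map (sp1 a)) (k+1) from rfl]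
    rw [List.foldl_cons, hstep, ih (k+1) _ (by omega)]
    rfl

theorem getLastD_append_of_ne_nil {α : Type} (P out : List α) (d : α) (h : out ≠ []) :
    (P ++ out).getLastD d = out.getLastD d := by
  induction P with
  | nil => rfl
  | cons x xs ih =>
    cases hxo : xs ++ out with
    | nil => exact absurd (List.append_eq_nil_iff.mp hxo).2 h
    | cons y ys => simp only [List.cons_append, hxo, List.getLastD_cons] at *; exact ih

theorem aStepNZ_prefix (b a : List Char) (P out : List (List Char)) (p : List Char)
    (h : out ≠ []) : aStepNZ b a (P ++ out) p = P ++ aStepNZ b a out p := by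
  unfold aStepNZ
  rw [List.dropLast_append_of_ne_nil h, getLastD_append_of_ne_nil P out [] h]
  split_ifs <;> simp [List.append_assoc]

theorem occurrence_bound (l sub : List Char) (hs : sub ≠ [])
    (h : PySem.Chars.find l sub ≠ -1) : l ≠ [] := by
  intro hl
  subst hl
  exact h (find_nil' sub hs)

theorem main_scan (b a : List Char) (hb : b ≠ []) (ha : a ≠ []) :
    ∀ (fuel : Nat) (rest cur : List Char) (out : List (List Char)), rest.length < fuel →
      (sp b rest).foldl (aStepNZ b a) (out ++ [cur]) = bScan b a fuel out cur rest := by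
  intro fuel
  induction fuel with
  | zero => intro rest cur out h; omega
  | succ f ih =>
    intro rest cur out hl
    rw [sp_char b hb rest.length rest (le_refl _)]
    show _ = bScan b a (f+1) out cur rest
    rw [bScan]
    by_cases hnb : PySem.Chars.find rest b = -1
    · -- last part: fold one step over [rest]
      simp only [hnb, if_true]
      rw [List.foldl_cons, List.foldl_nil,
        aStepNZ_prefix b a out [cur] rest (by simp)]
      unfold aStepNZ
      rw [sp1_char a ha rest]
      by_cases hj : PySem.Chars.find rest a = -1
      · simp [hj]
      · have hge : 0 ≤ PySem.Chars.find rest a := by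
          have := PySem.Chars.neg_one_le_find rest a; omega
        have h2 : ¬ (([rest.take (PySem.Chars.find rest a).toNat,
            rest.drop ((PySem.Chars.find rest a).toNat + a.length)] : List (List Char)).length = 1) := by simp
        simp only [hj, if_false, h2]
        have e3 : PySem.List.slice rest none (some (PySem.Chars.find rest a))
            = rest.take (PySem.Chars.find rest a).toNat := PySem.List.slice_to _ hge
        have e4 : PySem.List.slice rest (some (PySem.Chars.find rest a + (a.length:Int))) none
            = rest.drop ((PySem.Chars.find rest a).toNat + a.length) := by
          rw [PySem.List.slice_from _ (by omega)]
          try (congr 1 <;> omega)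
        rw [e3, e4]
        simp
    · -- a further `before` occurrence at nb ≥ 0
      have hge : 0 ≤ PySem.Chars.find rest b := by
        have := PySem.Chars.neg_one_le_find rest b; omega
      have hrest : rest ≠ [] := occurrence_bound rest b hb hnb
      simp only [hnb, if_false]
      have e1 : PySem.List.slice rest none (some (PySem.Chars.find rest b))
          = rest.take (PySem.Chars.find rest b).toNat := PySem.List.slice_to _ hge
      have e2 : PySem.List.slice rest (some (PySem.Chars.find rest b + (b.length:Int))) none
          = rest.drop ((PySem.Chars.find rest b).toNat + b.length) := by
        rw [PySem.List.slice_from _ (by omega)]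
        try (congr 1 <;> omega)
      rw [e1, e2]
      set n := (PySem.Chars.find rest b).toNat with hn
      set seg := rest.take n with hseg
      set rest2 := rest.drop (n + b.length) with hrest2
      have hlen2 : rest2.length < f := by
        rw [hrest2]
        have h1 : 0 < rest.length := List.length_pos_iff.mpr hrest
        have h2 : 0 < b.length := List.length_pos_iff.mpr hb
        simp only [List.length_drop]
        simp at hl
        omega
      rw [List.foldl_cons, aStepNZ_prefix b a out [cur] seg (by simp)]
      by_cases hj : PySem.Chars.find seg a = -1
      · -- no `after` in this part: fold it into cur
        have hstep : aStepNZ b a [cur] seg = [cur ++ b ++ seg] := by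
          unfold aStepNZ
          rw [sp1_char a ha seg]
          simp [hj]
        rw [hstep, ih rest2 (cur ++ b ++ seg) out hlen2]
        simp [hj]
      · have hgej : 0 ≤ PySem.Chars.find seg a := by
          have := PySem.Chars.neg_one_le_find seg a; omega
        have hstep : aStepNZ b a [cur] seg
            = [cur ++ b, seg.take (PySem.Chars.find seg a).toNat,
               a ++ seg.drop ((PySem.Chars.find seg a).toNat + a.length)] := by
          unfold aStepNZ
          rw [sp1_char a ha seg]
          simp [hj]
        rw [hstep]
        rw [show out ++ [cur ++ b, seg.take (PySem.Chars.find seg a).toNat,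
              a ++ seg.drop ((PySem.Chars.find seg a).toNat + a.length)]
            = (out ++ [cur ++ b, seg.take (PySem.Chars.find seg a).toNat])
              ++ [a ++ seg.drop ((PySem.Chars.find seg a).toNat + a.length)] from by simp]
        rw [ih rest2 _ _ hlen2]
        simp only [hj, if_false]
        have e3 : PySem.List.slice seg none (some (PySem.Chars.find seg a))
            = seg.take (PySem.Chars.find seg a).toNat := PySem.List.slice_to _ hgej
        have e4 : PySem.List.slice seg (some (PySem.Chars.find seg a + (a.length:Int))) none
            = seg.drop ((PySem.Chars.find seg a).toNat + a.length) := by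
          rw [PySem.List.slice_from _ (by omega)]
          try (congr 1 <;> omega)
        rw [e3, e4]

theorem core_eq (s b a : List Char) (hb : b ≠ []) (ha : a ≠ []) :
    split_by_brackets_core s b a = split_by_brackets_alt_core s b a := by
  have hbe : b.isEmpty = false := by simp [List.isEmpty_iff, hb]
  have hae : a.isEmpty = false := by simp [List.isEmpty_iff, ha]
  unfold split_by_brackets_core split_by_brackets_alt_core
  rw [show PySem.Chars.split? s b = some (PySem.Chars.splitOn s b) from by
    unfold PySem.Chars.split?; simp [hbe]]
  simp only [hbe, hae, Bool.or_self, Bool.false_or]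
  have hmap : (PySem.Chars.splitOn s b).map (fun part => (PySem.Chars.splitMax? part a 1).getD [])
      = (sp b s).map (sp1 a) := by
    rw [splitOn_eq_sp s b hb]
    apply List.map_congr_left
    intro p _
    rw [show PySem.Chars.splitMax? p a 1 = some (PySem.Chars.splitOnMax p a 1) from by
      unfold PySem.Chars.splitMax?; simp [hae]]
    rw [Option.getD_some, splitOnMax_one p a ha]
  rw [hmap]
  by_cases hf : PySem.Chars.find s b = -1
  · rw [sp_char b hb s.length s (le_refl _)]
    simp only [hf, if_true]
    show (PySem.List.enumerate [sp1 a s] 0).foldl (aStep b a) [] = [s]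
    rw [show PySem.List.enumerate [sp1 a s] 0 = [((0:Int), sp1 a s)] from rfl]
    rw [List.foldl_cons, List.foldl_nil]
    simp [aStep, join_sp1 a ha s]
  · have hge : 0 ≤ PySem.Chars.find s b := by
      have := PySem.Chars.neg_one_le_find s b; omega
    have hsne : s ≠ [] := occurrence_bound s b hb hf
    rw [sp_char b hb s.length s (le_refl _)]
    simp only [hf, if_false]
    have e1 : PySem.List.slice s none (some (PySem.Chars.find s b))
        = s.take (PySem.Chars.find s b).toNat := PySem.List.slice_to _ hge
    have e2 : PySem.List.slice s (some (PySem.Chars.find s b + (b.length:Int))) none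
        = s.drop ((PySem.Chars.find s b).toNat + b.length) := by
      rw [PySem.List.slice_from _ (by omega)]
      try (congr 1 <;> omega)
    rw [e1, e2]
    set n := (PySem.Chars.find s b).toNat with hn
    set s2 := s.drop (n + b.length) with hs2
    show (PySem.List.enumerate (sp1 a (s.take n) :: (sp b s2).map (sp1 a)) 0).foldl (aStep b a) []
        = bScan b a s.length [] (s.take n) s2
    rw [show PySem.List.enumerate (sp1 a (s.take n) :: (sp b s2).map (sp1 a)) 0
        = ((0:Int), sp1 a (s.take n)) :: PySem.List.enumerate ((sp b s2).map (sp1 a)) 1 from rfl]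
    rw [List.foldl_cons]
    rw [show aStep b a [] ((0:Int), sp1 a (s.take n)) = [s.take n] from by
      simp [aStep, join_sp1 a ha]]
    rw [enum_fold b a _ 1 _ (le_refl _)]
    have hlen2 : s2.length < s.length := by
      rw [hs2]
      have h1 : 0 < s.length := List.length_pos_iff.mpr hsne
      have h2 : 0 < b.length := List.length_pos_iff.mpr hb
      simp only [List.length_drop]
      omega
    have hms := main_scan b a hb ha s.length s2 (s.take n) [] hlen2
    simpa using hms

-- ===== VERDICT (by name: the statement is the Claim_ definition above) =====
theorem split_by_brackets_spec : Claim_equal_split_by_brackets := by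
  intro string before after _ hpre
  unfold Spec_split_by_brackets split_by_brackets split_by_brackets_alt
  have hb : before.toList ≠ [] := by
    intro h; exact hpre.1 (String.ext (h.trans rfl))
  have ha : after.toList ≠ [] := by
    intro h; exact hpre.2 (String.ext (h.trans rfl))
  rw [core_eq _ _ _ hb ha]
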